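-- pv_equiv track=rewrite | github.com/grapheneaffiliate/h4-polytopic-attention | solve_arc_b14.py | solve_97999447
-- ===== SOURCE A (Python) =====
-- import copy
--
-- def solve_97999447(grid):
--     grid = copy.deepcopy(grid)
--     rows, cols = len(grid), len(grid[0])
--
--     # Find non-zero cells
--     dots = []
--     for r in range(rows):
--         for c in range(cols):
--             if grid[r][c] != 0:
--                 dots.append((r, c, grid[r][c]))
--
--     for r, c, val in dots:
--         # Fill rightward: val, 5, val, 5, ...
--         for i, cc in enumerate(range(c, cols)):
--             if i == 0:
--                 grid[r][cc] = val
--             elif i % 2 == 0: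
--                 grid[r][cc] = val
--             else:
--                 grid[r][cc] = 5
--
--     return grid
-- ===== SOURCE B (Python) =====
-- def solve_97999447(grid):
--     cols = len(grid[0])
--
--     def fill_row(row):
--         new = list(row)
--         val = None
--         d = 0
--         for c in range(cols):
--             x = row[c]
--             if x != 0:
--                 val, d = x, 0
--             if val is not None:
--                 new[c] = val if d % 2 == 0 else 5
--                 d += 1
--         return new
--
--     return [fill_row(row) for row in grid]
-- ===== Notes on version B (the rewrite author's own statement) =====
-- stated objective: faster
-- what changed: Replaced the collect-all-dots pass plus a full rightward re-fill from every dot (rewriting the tail of a row once per dot) by a single left-to-right sweep over the first len(grid[0]) cells of each row, tracking the last non-zero value and the distance to it.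
import Mathlib
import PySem

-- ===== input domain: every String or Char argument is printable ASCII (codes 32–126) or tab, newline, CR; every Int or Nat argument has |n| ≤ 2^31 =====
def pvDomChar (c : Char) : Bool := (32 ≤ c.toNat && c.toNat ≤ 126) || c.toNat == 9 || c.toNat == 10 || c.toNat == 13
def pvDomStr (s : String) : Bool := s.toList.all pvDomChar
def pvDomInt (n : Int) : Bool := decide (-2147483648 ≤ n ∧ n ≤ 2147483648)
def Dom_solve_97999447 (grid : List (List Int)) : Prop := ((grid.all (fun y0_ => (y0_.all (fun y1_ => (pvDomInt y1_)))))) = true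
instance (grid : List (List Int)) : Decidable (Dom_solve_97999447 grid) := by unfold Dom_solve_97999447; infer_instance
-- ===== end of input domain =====

-- B replaces A's per-dot rightward re-fill (quadratic per row) with one left-to-right sweep per
-- row tracking the last non-zero value and the parity of the distance to it.

-- ===== PORT A =====
def solve_97999447 (grid : List (List Int)) : List (List Int) :=
  let rows : Int := grid.length
  let cols : Int := ((PySem.List.pyGet? grid 0).getD []).length
  let dots : List (Int × Int × Int) :=
    (PySem.List.pyRange 0 rows 1).foldl (fun acc r =>
      (PySem.List.pyRange 0 cols 1).foldl (fun acc c =>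
        let v := PySem.List.pyGetD (PySem.List.pyGetD grid r []) c 0
        if v ≠ 0 then acc ++ [(r, c, v)] else acc) acc) []
  dots.foldl (fun g rcv =>
    (PySem.List.enumerate (PySem.List.pyRange rcv.2.1 cols 1)).foldl (fun g icc =>
      let newv : Int := if icc.1 = 0 then rcv.2.2
                        else if PySem.Int.mod icc.1 2 = 0 then rcv.2.2 else 5
      PySem.List.pySetD g rcv.1 (PySem.List.pySetD (PySem.List.pyGetD g rcv.1 []) icc.2 newv)) g) grid

-- ===== PORT B =====
def fillRowB (cols : Int) (row : List Int) : List Int :=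
  ((PySem.List.pyRange 0 cols 1).foldl (fun st c =>
      let x := PySem.List.pyGetD row c 0
      let vd := if x ≠ 0 then some (x, (0 : Int)) else st.2
      match vd with
      | none => (st.1, none)
      | some (v, d) =>
        (PySem.List.pySetD st.1 c (if PySem.Int.mod d 2 = 0 then v else 5), some (v, d + 1)))
    (row, (none : Option (Int × Int)))).1

def solve_97999447_alt (grid : List (List Int)) : List (List Int) :=
  let cols : Int := ((PySem.List.pyGet? grid 0).getD []).length
  grid.map (fillRowB cols)

-- ===== PRECONDITION & SPEC =====
-- Pre_ excludes exactly the inputs where A raises: the empty grid (IndexError on len(grid[0]))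
-- and grids with a row shorter than row 0 (IndexError when the dot scan reads grid[r][c]).
def Pre_solve_97999447 (grid : List (List Int)) : Prop :=
  grid ≠ [] ∧ ∀ row ∈ grid, (grid.headD []).length ≤ row.length
instance (grid : List (List Int)) : Decidable (Pre_solve_97999447 grid) := by
  unfold Pre_solve_97999447; infer_instance

def pvWitness_solve_97999447 : List (List Int) := [[0, 3, 0, 0], [0, 0, 0, 0], [2, 0, 7, 0]]

def Spec_solve_97999447 (grid : List (List Int)) (out : List (List Int)) : Prop :=
  out = solve_97999447_alt grid
instance (grid : List (List Int)) (out : List (List Int)) : Decidable (Spec_solve_97999447 grid out) := by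
  unfold Spec_solve_97999447; infer_instance

-- ===== CLAIM (what is proved, stated in full; the proofs are below) =====
def Claim_equal_solve_97999447 : Prop :=
  ∀ (grid : List (List Int)), Dom_solve_97999447 grid → Pre_solve_97999447 grid →
    Spec_solve_97999447 grid (solve_97999447 grid)


-- ===== LEMMAS AND PROOFS =====

-- B's prefix sweep, element-wise (proof-side reformulation of fillRowB's loop)
def sweepStep (st : List Int × Option (Int × Int)) (x : Int) : List Int × Option (Int × Int) :=
  let st' := if x ≠ 0 then (st.1, some (x, (0 : Int))) else st
  match st'.2 with
  | none => (st'.1 ++ [x], none)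
  | some (v, d) => (st'.1 ++ [if PySem.Int.mod d 2 = 0 then v else 5], some (v, d + 1))

def sweepRow (row : List Int) : List Int := (row.foldl sweepStep ([], none)).1


-- the alternating pattern val,5,val,5,… written by a fill, starting at enumerate index i0
def patternFrom (v : Int) (i0 : Int) (m : Nat) : List Int :=
  (List.range m).map (fun j : Nat => if PySem.Int.mod (i0 + (j : Int)) 2 = 0 then v else 5)

-- columns/values of the non-zero cells of one row (A's dots for that row, untagged)
def rowDots (row : List Int) : List (Int × Int) :=
  ((PySem.List.pyRange 0 (row.length : Int) 1).filter
      (fun c => decide (PySem.List.pyGetD row c 0 ≠ 0))).map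
    (fun c => (c, PySem.List.pyGetD row c 0))

-- rowDots with an explicit column count (what A's scan literally uses)
def rowDotsC (cols : Int) (row : List Int) : List (Int × Int) :=
  ((PySem.List.pyRange 0 cols 1).filter
      (fun c => decide (PySem.List.pyGetD row c 0 ≠ 0))).map
    (fun c => (c, PySem.List.pyGetD row c 0))

-- one fill of A, row-level, value form: overwrite positions ≥ c with the pattern
def fillF (acc : List Int) (cv : Int × Int) : List Int :=
  acc.take cv.1.toNat ++ patternFrom cv.2 0 (acc.length - cv.1.toNat)

-- A's row-level fill as ported (enumerate over range(c, cols))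
def fillRowEnum (cols : Int) (row : List Int) (cv : Int × Int) : List Int :=
  (PySem.List.enumerate (PySem.List.pyRange cv.1 cols 1) 0).foldl (fun acc icc =>
    PySem.List.pySetD acc icc.2
      (if icc.1 = 0 then cv.2 else if PySem.Int.mod icc.1 2 = 0 then cv.2 else 5)) row

-- the sweep state after a row
def stB (row : List Int) : Option (Int × Int) := (row.foldl sweepStep ([], none)).2

-- what the sweep state is in terms of the last dot
def stSpec (row : List Int) : Option (Int × Int) :=
  match (rowDots row).getLast? with
  | none => none
  | some cv => some (cv.2, (row.length : Int) - cv.1)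

-- the final value of the cell appended behind `acc`, after all fills of `ds`
def lastFold (ds : List (Int × Int)) (y : Int) (n : Nat) : Int :=
  ds.foldl (fun _ cv => if PySem.Int.mod ((n : Int) - cv.1) 2 = 0 then cv.2 else 5) y

-- ===== pattern lemmas =====
lemma patternFrom_succ (v i0 : Int) (m : Nat) :
    patternFrom v i0 (m+1) = (if PySem.Int.mod i0 2 = 0 then v else 5) :: patternFrom v (i0+1) m := by
  unfold patternFrom
  rw [List.range_succ_eq_map, List.map_cons, List.map_map]
  refine congrArg₂ List.cons ?_ (List.map_congr_left ?_)
  · norm_num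
  · intro j _
    show (if PySem.Int.mod (i0 + ((j.succ : Nat) : Int)) 2 = 0 then v else 5) = _
    have h : i0 + ((j.succ : Nat) : Int) = (i0 + 1) + (j : Int) := by push_cast; ring
    rw [h]

lemma patternFrom_snoc (v i0 : Int) (m : Nat) :
    patternFrom v i0 (m+1)
      = patternFrom v i0 m ++ [if PySem.Int.mod (i0 + (m : Int)) 2 = 0 then v else 5] := by
  unfold patternFrom
  rw [List.range_succ]
  simp

@[simp] lemma patternFrom_zero (v i0 : Int) : patternFrom v i0 0 = [] := rfl

@[simp] lemma length_patternFrom (v i0 : Int) (m : Nat) : (patternFrom v i0 m).length = m := by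
  simp [patternFrom]

-- ===== generic list helper =====
lemma take_set_succ {α : Type} (l : List α) (n : Nat) (a : α) (h : n < l.length) :
    (l.set n a).take (n+1) = l.take n ++ [a] := by
  rw [List.set_eq_take_cons_drop a h, List.take_append]
  have h1 : (List.take n l).length = n := by simp [List.length_take]; omega
  rw [List.take_of_length_le (by omega), h1]
  norm_num

-- ===== fill lemmas =====
lemma fill_go (v : Int) (m : Nat) : ∀ (c i0 : Int) (row : List Int), 0 ≤ c → 0 ≤ i0 →
    c.toNat + m ≤ row.length →
    (PySem.List.enumerate (PySem.List.pyRange c (c + (m : Int)) 1) i0).foldl (fun acc icc =>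
      PySem.List.pySetD acc icc.2
        (if icc.1 = 0 then v else if PySem.Int.mod icc.1 2 = 0 then v else 5)) row
    = row.take c.toNat ++ patternFrom v i0 m ++ row.drop (c.toNat + m) := by
  induction m with
  | zero =>
    intro c i0 row hc _ hlen
    rw [show c + ((0:Nat):Int) = c by push_cast; ring,
        PySem.List.pyRange_one_eq_nil le_rfl, PySem.List.enumerate_nil, List.foldl_nil,
        patternFrom_zero, List.append_nil, Nat.add_zero, List.take_append_drop]
  | succ m ih =>
    intro c i0 row hc hi hlen
    rw [PySem.List.pyRange_one_cons (by push_cast; omega), PySem.List.enumerate_cons,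
        List.foldl_cons]
    have hstep : PySem.List.pySetD row c (if i0 = 0 then v else if PySem.Int.mod i0 2 = 0 then v else 5)
        = row.set c.toNat (if PySem.Int.mod i0 2 = 0 then v else 5) := by
      rw [PySem.List.pySetD_of_nonneg _ _ hc]
      congr 1
      by_cases h0 : i0 = 0
      · subst h0; norm_num
      · simp [h0]
    rw [hstep, show c + (((m+1:Nat)) : Int) = (c+1) + (m : Int) by push_cast; ring]
    rw [ih (c+1) (i0+1) _ (by omega) (by omega) (by rw [List.length_set]; omega)]
    have hcn : c.toNat < row.length := by omega
    rw [patternFrom_succ, show (c+1).toNat = c.toNat + 1 by omega, take_set_succ _ _ _ hcn,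
        List.drop_set, if_pos (show c.toNat < c.toNat + 1 + m by omega),
        show c.toNat + 1 + m = c.toNat + (m + 1) by omega]
    simp [List.append_assoc]

lemma length_fillF (acc : List Int) (cv : Int × Int) (h : cv.1.toNat ≤ acc.length) :
    (fillF acc cv).length = acc.length := by
  simp [fillF]
  omega

lemma fillRowEnum_split (cols : Int) (X t : List Int) (cv : Int × Int)
    (h0 : 0 ≤ cv.1) (hle : cv.1 ≤ cols) (hX : X.length = cols.toNat) :
    fillRowEnum cols (X ++ t) cv = fillF X cv ++ t := by
  obtain ⟨c, v⟩ := cv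
  simp only at h0 hle
  unfold fillRowEnum fillF
  rw [show cols = c + (((cols - c).toNat : Nat) : Int) by omega]
  rw [fill_go v (cols - c).toNat c 0 (X ++ t) h0 le_rfl (by simp; omega)]
  simp only
  rw [List.take_append_of_le_length (by omega),
      show c.toNat + (cols - c).toNat = X.length by omega, List.drop_left,
      show (cols - c).toNat = X.length - c.toNat by omega, List.append_assoc]

lemma foldl_fillRowEnum_split (cols : Int) :
    ∀ (ds : List (Int × Int)) (X t : List Int), X.length = cols.toNat →
    (∀ cv ∈ ds, 0 ≤ cv.1 ∧ cv.1 ≤ cols) →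
    List.foldl (fillRowEnum cols) (X ++ t) ds = List.foldl fillF X ds ++ t := by
  intro ds
  induction ds with
  | nil => intro X t _ _; rfl
  | cons cv ds ih =>
    intro X t hX hb
    obtain ⟨h0, h1⟩ := hb cv (List.mem_cons_self ..)
    rw [List.foldl_cons, List.foldl_cons, fillRowEnum_split cols X t cv h0 h1 hX]
    exact ih (fillF X cv) t (by rw [length_fillF X cv (by omega)]; exact hX)
      (fun cv' h' => hb cv' (List.mem_cons_of_mem _ h'))

lemma fillF_snoc (acc : List Int) (y : Int) (cv : Int × Int)
    (h0 : 0 ≤ cv.1) (h1 : cv.1.toNat ≤ acc.length) :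
    fillF (acc ++ [y]) cv
      = fillF acc cv ++ [if PySem.Int.mod ((acc.length : Int) - cv.1) 2 = 0 then cv.2 else 5] := by
  obtain ⟨c, v⟩ := cv
  simp only at h0 h1
  unfold fillF
  rw [List.take_append_of_le_length (by simpa using h1)]
  rw [show (acc ++ [y]).length - c.toNat = (acc.length - c.toNat) + 1 by simp; omega]
  rw [patternFrom_snoc, ← List.append_assoc]
  have harg : (0 : Int) + ((acc.length - c.toNat : Nat) : Int) = (acc.length : Int) - c := by
    rw [Nat.cast_sub h1, Int.toNat_of_nonneg h0]; ring
  rw [harg]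

lemma foldl_fillF_snoc (ds : List (Int × Int)) : ∀ (acc : List Int) (y : Int),
    (∀ cv ∈ ds, 0 ≤ cv.1 ∧ cv.1.toNat ≤ acc.length) →
    List.foldl fillF (acc ++ [y]) ds = List.foldl fillF acc ds ++ [lastFold ds y acc.length] := by
  induction ds with
  | nil => intro acc y _; simp [lastFold]
  | cons cv ds ih =>
    intro acc y h
    obtain ⟨h0, h1⟩ := h cv (List.mem_cons_self ..)
    rw [List.foldl_cons, List.foldl_cons, fillF_snoc acc y cv h0 h1,
        ih (fillF acc cv) _ (fun cv' h' => by
          rw [length_fillF acc cv h1]; exact h cv' (List.mem_cons_of_mem _ h')),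
        length_fillF acc cv h1]
    rfl

lemma length_foldl_fillF : ∀ (ds : List (Int × Int)) (row : List Int),
    (∀ cv ∈ ds, cv.1.toNat ≤ row.length) →
    (List.foldl fillF row ds).length = row.length := by
  intro ds
  induction ds with
  | nil => intro row _; rfl
  | cons cv ds ih =>
    intro row h
    rw [List.foldl_cons, ih _ (fun cv' h' => by
      rw [length_fillF row cv (h cv (List.mem_cons_self ..))]
      exact h cv' (List.mem_cons_of_mem _ h')), length_fillF row cv (h cv (List.mem_cons_self ..))]

lemma lastFold_eq (ds : List (Int × Int)) (n : Nat) : ∀ (y : Int), lastFold ds y n =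
    match ds.getLast? with
    | none => y
    | some cv => if PySem.Int.mod ((n : Int) - cv.1) 2 = 0 then cv.2 else 5 := by
  induction ds with
  | nil => intro y; rfl
  | cons cv ds ih =>
    intro y
    cases ds with
    | nil => simp [lastFold]
    | cons cv2 ds2 =>
      rw [show lastFold (cv :: cv2 :: ds2) y n
            = lastFold (cv2 :: ds2) (if PySem.Int.mod ((n:Int) - cv.1) 2 = 0 then cv.2 else 5) n
          from rfl, ih, List.getLast?_cons_cons]
      cases h2 : (cv2 :: ds2).getLast? with
      | none => exact absurd (List.getLast?_eq_none_iff.1 h2) (by simp)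
      | some cv3 => rfl

-- ===== sweep step lemmas =====
lemma sweepStep_nonzero (acc : List Int) (st : Option (Int × Int)) (x : Int) (hx : x ≠ 0) :
    sweepStep (acc, st) x = (acc ++ [x], some (x, 1)) := by
  simp [sweepStep, hx]

lemma sweepStep_zero_none (acc : List Int) :
    sweepStep (acc, none) 0 = (acc ++ [0], none) := by
  simp [sweepStep]

lemma sweepStep_zero_some (acc : List Int) (v d : Int) :
    sweepStep (acc, some (v, d)) 0
      = (acc ++ [if PySem.Int.mod d 2 = 0 then v else 5], some (v, d + 1)) := by
  simp [sweepStep]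

-- ===== rowDots lemmas =====
lemma mem_rowDots {row : List Int} {cv : Int × Int} (h : cv ∈ rowDots row) :
    0 ≤ cv.1 ∧ cv.1 < (row.length : Int) := by
  unfold rowDots at h
  rcases List.mem_map.1 h with ⟨c, hc, rfl⟩
  exact PySem.List.mem_pyRange_one.1 (List.mem_of_mem_filter hc)

lemma pyGetD_append_left (row : List Int) (x c : Int)
    (h0 : 0 ≤ c) (h1 : c < (row.length : Int)) :
    PySem.List.pyGetD (row ++ [x]) c 0 = PySem.List.pyGetD row c 0 := by
  rw [PySem.List.pyGetD_eq_getElem _ _ h0 (by simp; omega),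
      PySem.List.pyGetD_eq_getElem _ _ h0 h1]
  exact List.getElem_append_left (by omega)

lemma rowDots_snoc (row : List Int) (x : Int) :
    rowDots (row ++ [x])
      = rowDots row ++ (if x ≠ 0 then [((row.length : Int), x)] else []) := by
  unfold rowDots
  rw [show (((row ++ [x]).length : Nat) : Int) = (row.length : Int) + 1 by simp,
      PySem.List.pyRange_one_succ_right (by exact_mod_cast Nat.zero_le _),
      List.filter_append, List.map_append]
  have hx0 : PySem.List.pyGetD (row ++ [x]) (row.length : Int) 0 = x := by
    rw [PySem.List.pyGetD_natCast, List.getD_append_right _ _ _ _ le_rfl]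
    simp
  refine congrArg₂ (· ++ ·) ?_ ?_
  · rw [List.filter_congr (fun c hc => ?_)]
    · apply List.map_congr_left
      intro c hc
      have hm := PySem.List.mem_pyRange_one.1 (List.mem_of_mem_filter hc)
      rw [pyGetD_append_left _ _ _ hm.1 hm.2]
    · have hm := PySem.List.mem_pyRange_one.1 hc
      simp [pyGetD_append_left _ _ _ hm.1 hm.2]
  · by_cases h : x = 0
    · simp [h]
    · simp [h]

-- ===== the per-row equivalence =====
lemma main_row (row : List Int) :
    List.foldl fillF row (rowDots row) = sweepRow row ∧ stB row = stSpec row := by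
  induction row using List.reverseRecOn with
  | nil => exact ⟨by decide, by decide⟩
  | append_singleton row x ih =>
    obtain ⟨ihA, ihS⟩ := ih
    have hb : ∀ cv ∈ rowDots row, 0 ≤ cv.1 ∧ cv.1.toNat ≤ row.length := by
      intro cv h
      have := mem_rowDots h
      exact ⟨this.1, by omega⟩
    have hA : List.foldl fillF (row ++ [x]) (rowDots row)
        = sweepRow row ++ [lastFold (rowDots row) x row.length] := by
      rw [foldl_fillF_snoc (rowDots row) row x hb, ihA]
    have hsw : sweepRow (row ++ [x]) = (sweepStep (sweepRow row, stB row) x).1 := by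
      rw [sweepRow, List.foldl_concat]; rfl
    have hst : stB (row ++ [x]) = (sweepStep (sweepRow row, stB row) x).2 := by
      rw [stB, List.foldl_concat]; rfl
    have hlen : (sweepRow row).length = row.length := by
      rw [← ihA]
      exact length_foldl_fillF _ _ (fun cv h => (hb cv h).2)
    unfold stSpec
    rw [rowDots_snoc]
    by_cases hx : x = 0
    · subst hx
      rw [show (if (0:Int) ≠ 0 then [((row.length : Int), (0:Int))] else []) = [] by simp,
          List.append_nil]
      cases hgl : (rowDots row).getLast? with
      | none =>
        have hstB : stB row = none := by rw [ihS, stSpec, hgl]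
        constructor
        · rw [hA, lastFold_eq, hgl, hsw, hstB, sweepStep_zero_none]
        · rw [hst, hstB, sweepStep_zero_none]
      | some cv =>
        have hstB : stB row = some (cv.2, (row.length : Int) - cv.1) := by
          rw [ihS, stSpec, hgl]
        constructor
        · rw [hA, lastFold_eq, hgl, hsw, hstB, sweepStep_zero_some]
        · rw [hst, hstB, sweepStep_zero_some]
          exact congrArg (fun t => some (cv.2, t))
            (by simp only [List.length_append, List.length_cons, List.length_nil]; omega)
    · rw [if_pos hx]
      have hAx : List.foldl fillF (row ++ [x]) (rowDots row ++ [((row.length : Int), x)])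
          = sweepRow row ++ [x] := by
        rw [List.foldl_concat, hA]
        unfold fillF
        simp only [Int.toNat_natCast]
        rw [List.take_append_of_le_length (by omega), List.take_of_length_le (by omega)]
        rw [show (sweepRow row ++ [lastFold (rowDots row) x row.length]).length - row.length = 1
            by simp [hlen]]
        rw [show patternFrom x 0 1 = [x] by
          rw [patternFrom_succ, patternFrom_zero, if_pos (by decide : PySem.Int.mod 0 2 = 0)]]
      constructor
      · rw [hAx, hsw, sweepStep_nonzero _ _ _ hx]
      · rw [hst, sweepStep_nonzero _ _ _ hx, List.getLast?_concat]
        exact congrArg (fun t => some (x, t))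
          (by simp only [List.length_append, List.length_cons, List.length_nil]; omega)

-- ===== grid-level lemmas =====
lemma pyGetD_eq_getElem_grid (g : List (List Int)) (r : Int) (h0 : 0 ≤ r) (h1 : r.toNat < g.length) :
    PySem.List.pyGetD g r [] = g[r.toNat] :=
  PySem.List.pyGetD_eq_getElem _ _ h0 (by omega)

-- the inner enumerate-loop only rewrites row r of the grid
lemma loc_inner (r : Int) (nvf : Int × Int → Int) :
    ∀ (L : List (Int × Int)) (g : List (List Int)), 0 ≤ r → r.toNat < g.length →
    L.foldl (fun g icc =>
        PySem.List.pySetD g r (PySem.List.pySetD (PySem.List.pyGetD g r []) icc.2 (nvf icc))) g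
    = PySem.List.pySetD g r
        (L.foldl (fun row icc => PySem.List.pySetD row icc.2 (nvf icc)) (PySem.List.pyGetD g r [])) := by
  intro L
  induction L with
  | nil =>
    intro g h0 h1
    rw [List.foldl_nil, List.foldl_nil, pyGetD_eq_getElem_grid g r h0 h1,
        PySem.List.pySetD_of_nonneg _ _ h0, List.set_getElem_self]
  | cons icc L ih =>
    intro g h0 h1
    rw [List.foldl_cons, List.foldl_cons,
        ih _ h0 (by rw [PySem.List.length_pySetD]; exact h1)]
    rw [PySem.List.pySetD_of_nonneg _ _ h0, PySem.List.pySetD_of_nonneg _ _ h0,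
        PySem.List.pySetD_of_nonneg _ _ h0]
    rw [show PySem.List.pyGetD (g.set r.toNat (PySem.List.pySetD (PySem.List.pyGetD g r []) icc.2 (nvf icc))) r []
          = PySem.List.pySetD (PySem.List.pyGetD g r []) icc.2 (nvf icc) by
        rw [pyGetD_eq_getElem_grid _ r h0 (by rw [List.length_set]; exact h1)]
        exact List.getElem_set_self (by rw [List.length_set]; exact h1)]
    rw [List.set_set]

-- a run of dots of one row rewrites only row r, by the row-level fills
lemma rowgroup (cols r : Int) (h0 : 0 ≤ r) :
    ∀ (ds : List (Int × Int)) (g : List (List Int)), r.toNat < g.length →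
    List.foldl (fun g rcv =>
        (PySem.List.enumerate (PySem.List.pyRange rcv.2.1 cols 1) 0).foldl (fun g icc =>
          PySem.List.pySetD g rcv.1
            (PySem.List.pySetD (PySem.List.pyGetD g rcv.1 []) icc.2
              (if icc.1 = 0 then rcv.2.2
               else if PySem.Int.mod icc.1 2 = 0 then rcv.2.2 else 5))) g)
      g (ds.map (fun cv => (r, cv.1, cv.2)))
    = PySem.List.pySetD g r (List.foldl (fillRowEnum cols) (PySem.List.pyGetD g r []) ds) := by
  intro ds
  induction ds with
  | nil =>
    intro g h1
    rw [List.map_nil, List.foldl_nil, List.foldl_nil, pyGetD_eq_getElem_grid g r h0 h1,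
        PySem.List.pySetD_of_nonneg _ _ h0, List.set_getElem_self]
  | cons cv ds ih =>
    intro g h1
    rw [List.map_cons, List.foldl_cons]
    rw [show ((PySem.List.enumerate (PySem.List.pyRange (r, cv.1, cv.2).2.1 cols 1) 0).foldl (fun g icc =>
          PySem.List.pySetD g (r, cv.1, cv.2).1
            (PySem.List.pySetD (PySem.List.pyGetD g (r, cv.1, cv.2).1 []) icc.2
              (if icc.1 = 0 then (r, cv.1, cv.2).2.2
               else if PySem.Int.mod icc.1 2 = 0 then (r, cv.1, cv.2).2.2 else 5))) g)
          = PySem.List.pySetD g r (fillRowEnum cols (PySem.List.pyGetD g r []) cv) from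
      loc_inner r (fun icc => if icc.1 = 0 then cv.2
          else if PySem.Int.mod icc.1 2 = 0 then cv.2 else 5)
        (PySem.List.enumerate (PySem.List.pyRange cv.1 cols 1) 0) g h0 h1]
    rw [ih _ (by rw [PySem.List.length_pySetD]; exact h1)]
    rw [PySem.List.pySetD_of_nonneg _ _ h0, PySem.List.pySetD_of_nonneg _ _ h0,
        PySem.List.pySetD_of_nonneg _ _ h0]
    rw [show PySem.List.pyGetD (g.set r.toNat (fillRowEnum cols (PySem.List.pyGetD g r []) cv)) r []
          = fillRowEnum cols (PySem.List.pyGetD g r []) cv by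
        rw [pyGetD_eq_getElem_grid _ r h0 (by rw [List.length_set]; exact h1)]
        exact List.getElem_set_self (by rw [List.length_set]; exact h1)]
    rw [List.set_set, List.foldl_cons]

-- the outer loop over the rows, processed left to right
lemma outer_fold (cols : Int) (grid : List (List Int)) :
    ∀ (m : Nat) (k : Int) (g : List (List Int)), 0 ≤ k → k.toNat + m = grid.length →
    g.length = grid.length → g.drop k.toNat = grid.drop k.toNat →
    (PySem.List.pyRange k (grid.length : Int) 1).foldl
      (fun g r => List.foldl (fun g rcv =>
          (PySem.List.enumerate (PySem.List.pyRange rcv.2.1 cols 1) 0).foldl (fun g icc =>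
            PySem.List.pySetD g rcv.1
              (PySem.List.pySetD (PySem.List.pyGetD g rcv.1 []) icc.2
                (if icc.1 = 0 then rcv.2.2
                 else if PySem.Int.mod icc.1 2 = 0 then rcv.2.2 else 5))) g)
        g ((rowDotsC cols (PySem.List.pyGetD grid r [])).map (fun cv => (r, cv.1, cv.2)))) g
    = g.take k.toNat
        ++ (grid.drop k.toNat).map (fun row => List.foldl (fillRowEnum cols) row (rowDotsC cols row)) := by
  intro m
  induction m with
  | zero =>
    intro k g hk hm hlen hdrop
    rw [PySem.List.pyRange_one_eq_nil (by omega), List.foldl_nil,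
        List.drop_of_length_le (by omega), List.map_nil, List.append_nil,
        List.take_of_length_le (by omega)]
  | succ m ih =>
    intro k g hk hm hlen hdrop
    have hklt : k.toNat < grid.length := by omega
    have hkg : k.toNat < g.length := by omega
    rw [PySem.List.pyRange_one_cons (by omega), List.foldl_cons,
        rowgroup cols k hk (rowDotsC cols (PySem.List.pyGetD grid k [])) g hkg]
    have hgk : PySem.List.pyGetD g k [] = PySem.List.pyGetD grid k [] := by
      rw [pyGetD_eq_getElem_grid g k hk hkg, pyGetD_eq_getElem_grid grid k hk hklt]
      have h1 := List.drop_eq_getElem_cons hkg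
      have h2 := List.drop_eq_getElem_cons hklt
      rw [hdrop, h2] at h1
      exact (List.cons.injEq _ _ _ _ ▸ h1).1.symm
    rw [hgk, PySem.List.pySetD_of_nonneg _ _ hk]
    set R := List.foldl (fillRowEnum cols) (PySem.List.pyGetD grid k [])
        (rowDotsC cols (PySem.List.pyGetD grid k [])) with hR
    rw [ih (k+1) (g.set k.toNat R) (by omega) (by omega)
        (by rw [List.length_set]; exact hlen)
        (by
          rw [show (k+1).toNat = k.toNat + 1 by omega, List.drop_set, if_pos (by omega)]
          have h3 := congrArg (List.drop 1) hdrop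
          rw [List.drop_drop, List.drop_drop] at h3
          simpa [Nat.add_comm] using h3)]
    rw [show (k+1).toNat = k.toNat + 1 by omega, take_set_succ _ _ _ hkg]
    rw [List.drop_eq_getElem_cons hklt, List.map_cons, List.append_assoc]
    congr 2
    rw [hR, pyGetD_eq_getElem_grid grid k hk hklt]
    rfl

-- A's dot scan over one row, as a filter
lemma inner_scan (cols r : Int) (rowr : List Int) (acc : List (Int × Int × Int)) :
    (PySem.List.pyRange 0 cols 1).foldl (fun acc c =>
        if PySem.List.pyGetD rowr c 0 ≠ 0
        then acc ++ [(r, c, PySem.List.pyGetD rowr c 0)] else acc) acc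
    = acc ++ (rowDotsC cols rowr).map (fun cv => (r, cv.1, cv.2)) := by
  rw [PySem.List.foldl_append_ite (fun c => PySem.List.pyGetD rowr c 0 ≠ 0)
      (fun c => (r, c, PySem.List.pyGetD rowr c 0))]
  unfold rowDotsC
  rw [List.map_map]
  rfl

-- ===== B-side: the prefix loop of fillRowB is the sweep of the prefix =====
lemma pyGetD_index (row : List Int) (k : Nat) (h : k < row.length) :
    PySem.List.pyGetD row (k : Int) 0 = row[k] := by
  rw [PySem.List.pyGetD_natCast, List.getD_eq_getElem _ _ h]

lemma B_go (row : List Int) (m : Nat) : ∀ (k : Nat) (acc : List Int) (st : Option (Int × Int)),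
    acc.length = k → k + m ≤ row.length →
    (PySem.List.pyRange (k : Int) ((k : Int) + (m : Int)) 1).foldl (fun st c =>
        let x := PySem.List.pyGetD row c 0
        let vd := if x ≠ 0 then some (x, (0 : Int)) else st.2
        match vd with
        | none => (st.1, none)
        | some (v, d) =>
          (PySem.List.pySetD st.1 c (if PySem.Int.mod d 2 = 0 then v else 5), some (v, d + 1)))
      (acc ++ row.drop k, st)
    = ((((row.drop k).take m).foldl sweepStep (acc, st)).1 ++ row.drop (k + m),
       (((row.drop k).take m).foldl sweepStep (acc, st)).2) := by
  induction m with
  | zero =>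
    intro k acc st _ _
    rw [show (k : Int) + ((0:Nat):Int) = (k : Int) by push_cast; ring,
        PySem.List.pyRange_one_eq_nil le_rfl, List.foldl_nil, List.take_zero, List.foldl_nil,
        Nat.add_zero]
  | succ m ih =>
    intro k acc st hacc hlen
    have hk : k < row.length := by omega
    have hdropk : row.drop k = row[k] :: row.drop (k+1) := List.drop_eq_getElem_cons hk
    rw [PySem.List.pyRange_one_cons (by push_cast; omega), List.foldl_cons]
    have hset : ∀ (e : Int), PySem.List.pySetD (acc ++ row.drop k) (k : Int) e
        = (acc ++ [e]) ++ row.drop (k+1) := by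
      intro e
      rw [PySem.List.pySetD_natCast, hdropk, List.set_append_right _ _ (by omega), hacc,
          Nat.sub_self, List.set_cons_zero, List.append_cons]
    have hstep : (let x := PySem.List.pyGetD row ((k : Nat) : Int) 0
        let vd := if x ≠ 0 then some (x, (0 : Int)) else (acc ++ row.drop k, st).2
        match vd with
        | none => ((acc ++ row.drop k, st).1, none)
        | some (v, d) =>
          (PySem.List.pySetD (acc ++ row.drop k, st).1 ((k : Nat) : Int)
             (if PySem.Int.mod d 2 = 0 then v else 5), some (v, d + 1)))
        = ((sweepStep (acc, st) row[k]).1 ++ row.drop (k+1), (sweepStep (acc, st) row[k]).2) := by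
      show (match (if PySem.List.pyGetD row (k : Int) 0 ≠ 0
                   then some (PySem.List.pyGetD row (k : Int) 0, (0 : Int)) else st) with
            | none => ((acc ++ row.drop k : List Int), (none : Option (Int × Int)))
            | some (v, d) =>
              (PySem.List.pySetD (acc ++ row.drop k) (k : Int)
                 (if PySem.Int.mod d 2 = 0 then v else 5), some (v, d + 1))) = _
      rw [pyGetD_index row k hk]
      by_cases hx : row[k] = 0
      · rw [if_neg (by simp [hx]), hx]
        cases st with
        | none =>
          show (acc ++ row.drop k, (none : Option (Int × Int))) = _
          rw [sweepStep_zero_none, hdropk, hx, List.append_cons]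
        | some vd =>
          obtain ⟨v, d⟩ := vd
          show (PySem.List.pySetD (acc ++ row.drop k) (k : Int)
              (if PySem.Int.mod d 2 = 0 then v else 5), some (v, d + 1)) = _
          rw [sweepStep_zero_some, hset]
      · rw [if_pos (by simp [hx])]
        show (PySem.List.pySetD (acc ++ row.drop k) (k : Int)
            (if PySem.Int.mod (0:Int) 2 = 0 then row[k] else 5), some (row[k], (0:Int) + 1)) = _
        rw [sweepStep_nonzero _ _ _ hx, hset,
            if_pos (show PySem.Int.mod (0:Int) 2 = 0 by decide), zero_add]
    have hlen1 : ((sweepStep (acc, st) row[k]).1).length = k + 1 := by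
      unfold sweepStep
      by_cases hx : row[k] = 0
      · simp only [hx]
        cases st with
        | none => simp [hacc]
        | some vd => obtain ⟨v, d⟩ := vd; simp [hacc]
      · simp [hx, hacc]
    rw [show ((k : Nat) : Int) + 1 = (((k+1:Nat)) : Int) by push_cast; ring,
        show ((k : Nat) : Int) + (((m+1:Nat)) : Int) = (((k+1:Nat)) : Int) + ((m : Nat) : Int)
          by push_cast; ring, hstep,
        ih (k+1) (sweepStep (acc, st) row[k]).1 (sweepStep (acc, st) row[k]).2 hlen1 (by omega),
        hdropk, List.take_succ_cons, List.foldl_cons,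
        show k + (m + 1) = (k + 1) + m by omega]

lemma fillRowB_eq (cols : Int) (row : List Int) (h0 : 0 ≤ cols) (hle : cols.toNat ≤ row.length) :
    fillRowB cols row = sweepRow (row.take cols.toNat) ++ row.drop cols.toNat := by
  unfold fillRowB
  have h := B_go row cols.toNat 0 [] none rfl (by omega)
  rw [Nat.cast_zero, zero_add, List.drop_zero, List.nil_append, Nat.zero_add] at h
  rw [show (PySem.List.pyRange 0 cols 1) = PySem.List.pyRange 0 ((cols.toNat : Nat) : Int) 1
      by rw [Int.toNat_of_nonneg h0], h]
  rfl

-- the columns scanned by A are the dots of the prefix row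
lemma pyGetD_take (row : List Int) (n : Nat) (c : Int) (h0 : 0 ≤ c) (h1 : c < (n : Int))
    (h2 : n ≤ row.length) :
    PySem.List.pyGetD (row.take n) c 0 = PySem.List.pyGetD row c 0 := by
  rw [PySem.List.pyGetD_eq_getElem _ _ h0 (by simp [List.length_take]; omega),
      PySem.List.pyGetD_eq_getElem _ _ h0 (by omega)]
  exact List.getElem_take

lemma rowDotsC_eq_rowDots_take (cols : Int) (row : List Int) (h0 : 0 ≤ cols)
    (hle : cols.toNat ≤ row.length) :
    rowDotsC cols row = rowDots (row.take cols.toNat) := by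
  unfold rowDotsC rowDots
  rw [show (((row.take cols.toNat).length : Nat) : Int) = cols
      by simp [List.length_take]; omega]
  rw [List.filter_congr (fun c hc => ?_)]
  · apply List.map_congr_left
    intro c hc
    have hm := PySem.List.mem_pyRange_one.1 (List.mem_of_mem_filter hc)
    rw [pyGetD_take row cols.toNat c hm.1 (by rw [Int.toNat_of_nonneg h0]; exact hm.2) hle]
  · have hm := PySem.List.mem_pyRange_one.1 hc
    simp [pyGetD_take row cols.toNat c hm.1 (by rw [Int.toNat_of_nonneg h0]; exact hm.2) hle]

-- A computes, row by row, the fills of that row's dots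
lemma A_eq_map_fill (grid : List (List Int)) :
    solve_97999447 grid
      = grid.map (fun row => List.foldl
          (fillRowEnum (((PySem.List.pyGet? grid 0).getD []).length : Int)) row
          (rowDotsC (((PySem.List.pyGet? grid 0).getD []).length : Int) row)) := by
  simp only [solve_97999447]
  rw [show (fun (acc : List (Int × Int × Int)) (r : Int) =>
        (PySem.List.pyRange 0 ((((PySem.List.pyGet? grid 0).getD []).length : Nat) : Int) 1).foldl
          (fun acc c =>
            if PySem.List.pyGetD (PySem.List.pyGetD grid r []) c 0 ≠ 0
            then acc ++ [(r, c, PySem.List.pyGetD (PySem.List.pyGetD grid r []) c 0)] else acc) acc)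
      = fun acc r => acc ++ ((rowDotsC ((((PySem.List.pyGet? grid 0).getD []).length : Nat) : Int)
          (PySem.List.pyGetD grid r [])).map (fun cv => (r, cv.1, cv.2))) from
    funext (fun acc => funext (fun r => inner_scan _ r _ acc))]
  rw [PySem.List.foldl_append_eq_flatMap, List.nil_append, List.foldl_flatMap]
  have h := outer_fold (((PySem.List.pyGet? grid 0).getD []).length : Int) grid grid.length 0 grid
    le_rfl (by simp) rfl rfl
  simpa using h

-- ===== VERDICT (by name: the statement is the Claim_ definition above) =====
theorem solve_97999447_spec : Claim_equal_solve_97999447 := by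
  unfold Claim_equal_solve_97999447
  intro grid _ hpre
  unfold Spec_solve_97999447
  simp only [solve_97999447_alt]
  obtain ⟨hne, hwide⟩ := hpre
  rw [A_eq_map_fill]
  apply List.map_congr_left
  intro row hrow
  have hcols : ((PySem.List.pyGet? grid 0).getD []).length = (grid.headD []).length := by
    cases grid with
    | nil => exact absurd rfl hne
    | cons h t => norm_num [PySem.List.pyGet?, PySem.List.pyIdx?]
  have hlenrow : ((PySem.List.pyGet? grid 0).getD []).length ≤ row.length := by
    rw [hcols]; exact hwide row hrow
  set cols : Int := (((PySem.List.pyGet? grid 0).getD []).length : Int) with hcolsdef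
  have hc0 : 0 ≤ cols := by positivity
  have hlen : cols.toNat ≤ row.length := by omega
  have hXlen : (row.take cols.toNat).length = cols.toNat := by
    simp [List.length_take]; omega
  have hbnds : ∀ cv ∈ rowDots (row.take cols.toNat), 0 ≤ cv.1 ∧ cv.1 ≤ cols := by
    intro cv hcv
    have hm := mem_rowDots hcv
    refine ⟨hm.1, ?_⟩
    have h2 := hm.2
    rw [hXlen] at h2
    omega
  have e1 := foldl_fillRowEnum_split cols (rowDots (row.take cols.toNat))
    (row.take cols.toNat) (row.drop cols.toNat) hXlen hbnds
  rw [List.take_append_drop] at e1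
  rw [rowDotsC_eq_rowDots_take cols row hc0 hlen, e1, (main_row (row.take cols.toNat)).1,
      fillRowB_eq cols row hc0 hlen]
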